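-- pv_equiv track=rewrite | github.com/isaabellelopes/AtivRecurs-o | exerc8.py | sequenB
-- ===== SOURCE A (Python) =====
-- def sequenB(n):
--     if n == 1:
--
--         return 2
--
--     elif n == 2:
--
--         return 1
--
--     elif n % 2 == 0:
--
--         return 2 * sequenB(n - 2)
--
--     else:
--
--         return sequenB(n - 2)
-- ===== SOURCE B (Python) =====
-- def sequenB(n):
--     # closed form: odd -> 2, even -> 2**(n//2 - 1)
--     return 2 if n % 2 else 2 ** (n // 2 - 1)
-- ===== Notes on version B (the rewrite author's own statement) =====
-- stated objective: faster
-- what changed: Replaced the O(n)-deep n-2 recursion by the closed form (2 if n is odd else 2**(n//2-1)).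
import Mathlib
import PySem

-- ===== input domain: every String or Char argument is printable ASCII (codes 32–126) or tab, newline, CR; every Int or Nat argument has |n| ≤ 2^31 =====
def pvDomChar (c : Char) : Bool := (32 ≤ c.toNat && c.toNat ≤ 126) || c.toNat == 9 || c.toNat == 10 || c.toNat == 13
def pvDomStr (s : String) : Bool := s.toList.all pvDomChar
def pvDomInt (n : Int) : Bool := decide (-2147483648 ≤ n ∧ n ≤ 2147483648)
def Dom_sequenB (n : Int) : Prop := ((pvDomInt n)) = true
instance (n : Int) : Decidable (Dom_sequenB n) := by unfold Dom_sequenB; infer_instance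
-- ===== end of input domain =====

-- B replaces A's O(n)-deep n-2 recursion by the closed form: 2 if n is odd else 2^(n//2-1) (objective: faster).

-- ===== PORT A =====
-- literal transliteration of A's recursion; the fuel parameter is only a totality
-- guard (fuel n.toNat is always enough on Pre_, where n ≥ 1)
def sequenBFuel : Nat → Int → Int
  | 0, _ => 0
  | Nat.succ f, n =>
    if n == 1 then 2
    else if n == 2 then 1
    else if PySem.Int.mod n 2 == 0 then 2 * sequenBFuel f (n - 2)
    else sequenBFuel f (n - 2)

def sequenB (n : Int) : Int := sequenBFuel n.toNat n

-- ===== PORT B =====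
def sequenB_alt (n : Int) : Int :=
  if PySem.Int.mod n 2 ≠ 0 then 2
  else 2 ^ (PySem.Int.floordiv n 2 - 1).toNat

-- ===== PRECONDITION & SPEC =====
-- Pre_ excludes n ≤ 0, where A's recursion never reaches a base case (RecursionError).
def Pre_sequenB (n : Int) : Prop := 1 ≤ n
instance (n : Int) : Decidable (Pre_sequenB n) := by unfold Pre_sequenB; infer_instance
def pvWitness_sequenB : Int := 7
def Spec_sequenB (n : Int) (out : Int) : Prop := out = sequenB_alt n
instance (n : Int) (out : Int) : Decidable (Spec_sequenB n out) := by unfold Spec_sequenB; infer_instance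

-- ===== CLAIM (what is proved, stated in full; the proofs are below) =====
def Claim_equal_sequenB : Prop := ∀ (n : Int), Dom_sequenB n → Pre_sequenB n → Spec_sequenB n (sequenB n)

-- ===== LEMMAS AND PROOFS =====

theorem sequenB_alt_odd {n : Int} (h : n % 2 = 1) : sequenB_alt n = 2 := by
  unfold sequenB_alt
  rw [PySem.Int.mod_eq_emod_of_pos (a := n) (by norm_num), h]
  norm_num

theorem sequenB_alt_even {n : Int} (h : n % 2 = 0) :
    sequenB_alt n = 2 ^ (n / 2 - 1).toNat := by
  unfold sequenB_alt
  rw [PySem.Int.mod_eq_emod_of_pos (a := n) (by norm_num),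
      PySem.Int.floordiv_eq_ediv_of_pos (a := n) (by norm_num), h]
  norm_num

theorem sequenBFuel_eq_alt : ∀ (f : Nat) (n : Int), 1 ≤ n → n.toNat ≤ f →
    sequenBFuel f n = sequenB_alt n := by
  intro f
  induction f with
  | zero => intro n h1 h2; omega
  | succ f ih =>
    intro n h1 h2
    by_cases hn1 : n = 1
    · subst hn1; simp [sequenBFuel, sequenB_alt, PySem.Int.mod]
    by_cases hn2 : n = 2
    · subst hn2; simp [sequenBFuel, sequenB_alt, PySem.Int.mod, PySem.Int.floordiv]
    have h3 : 3 ≤ n := by omega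
    have hm : PySem.Int.mod n 2 = n % 2 :=
      PySem.Int.mod_eq_emod_of_pos (a := n) (by norm_num)
    have hrec := ih (n - 2) (by omega) (by omega)
    by_cases he : n % 2 = 0
    · have h4 : 4 ≤ n := by omega
      simp only [sequenBFuel, hm]
      rw [if_neg (by simp [hn1]), if_neg (by simp [hn2]), if_pos (by simp [he]), hrec]
      rw [sequenB_alt_even he, sequenB_alt_even (n := n - 2) (by omega)]
      have he1 : 1 ≤ n / 2 - 1 := by omega
      have hstep : (n / 2 - 1).toNat = ((n - 2) / 2 - 1).toNat + 1 := by omega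
      rw [hstep, pow_succ]
      ring
    · have ho : n % 2 = 1 := by omega
      simp only [sequenBFuel, hm]
      rw [if_neg (by simp [hn1]), if_neg (by simp [hn2]), if_neg (by simp [ho]), hrec]
      rw [sequenB_alt_odd ho, sequenB_alt_odd (n := n - 2) (by omega)]

-- ===== VERDICT (by name: the statement is the Claim_ definition above) =====
theorem sequenB_spec : Claim_equal_sequenB := by
  intro n _ hpre
  unfold Spec_sequenB sequenB
  exact sequenBFuel_eq_alt n.toNat n hpre (le_refl _)
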